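-- pv_equiv track=rewrite | github.com/Centrattic/global-cot-analysis | src/property_checkers/debug_multi_algorithm.py | _first_index_with_any
-- ===== SOURCE A (Python) =====
-- from typing import List, Dict, Any
--
-- def _first_index_with_any(sentences: List[str], patterns: List[str]) -> int:
--     """Return 1-indexed first sentence index that contains any pattern (case-insensitive), or 0 if none."""
--     lowered_patterns = [p.lower() for p in patterns]
--     for i, s in enumerate(sentences, start=1):
--         ls = s.lower()
--         for p in lowered_patterns:
--             if p in ls:
--                 return i
--     return 0
-- ===== SOURCE B (Python) =====
-- def _first_index_with_any(sentences, patterns):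
--     """Return 1-indexed first sentence index that contains any pattern (case-insensitive), or 0 if none."""
--     lowered = [s.lower() for s in sentences]
--     best = 0
--     for p in patterns:
--         pl = p.lower()
--         # only sentences before the current best can still improve the answer
--         limit = len(lowered) if best == 0 else best - 1
--         fi = 0
--         for i, ls in enumerate(lowered[:limit], start=1):
--             if pl in ls:
--                 fi = i
--                 break
--         if fi != 0 and (best == 0 or fi < best):
--             best = fi
--     return best
-- ===== Notes on version B (the rewrite author's own statement) =====
-- stated objective: alternative
-- what changed: Traversal order is swapped: instead of scanning sentences and testing every pattern inside each (returning on the first hit), B computes for each pattern the first sentence index containing it — scanning only sentences before the current best, which cannot change the answer — and folds these per-pattern first indices with a min that treats 0 as 'no match'.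
import Mathlib
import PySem

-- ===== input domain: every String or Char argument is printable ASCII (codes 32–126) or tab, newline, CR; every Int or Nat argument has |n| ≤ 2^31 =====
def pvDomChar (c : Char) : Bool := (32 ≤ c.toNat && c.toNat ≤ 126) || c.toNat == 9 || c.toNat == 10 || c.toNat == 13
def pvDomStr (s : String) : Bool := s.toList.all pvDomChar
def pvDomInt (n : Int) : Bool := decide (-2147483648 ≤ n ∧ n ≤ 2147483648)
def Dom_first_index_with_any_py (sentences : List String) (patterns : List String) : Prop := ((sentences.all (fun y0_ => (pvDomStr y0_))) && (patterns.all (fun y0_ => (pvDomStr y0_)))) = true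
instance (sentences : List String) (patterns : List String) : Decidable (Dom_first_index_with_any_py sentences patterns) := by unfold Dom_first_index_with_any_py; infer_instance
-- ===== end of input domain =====

-- B swaps the traversal order: per-pattern first sentence index, folded with a min that
-- treats 0 as "no match" (alternative decomposition; same asymptotic cost).

-- ===== PORT A =====
-- "for p in lowered_patterns: if p in ls: return i" (the inner loop, as a Bool: did any pattern hit?)
def pvAInner (lp : List String) (ls : String) : Bool :=
  match lp with
  | [] => false
  | p :: rest => if PySem.Str.isIn p ls then true else pvAInner rest ls

-- "for i, s in enumerate(sentences, start=1): …"
def pvALoop (lp : List String) (ss : List String) (i : Int) : Int :=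
  match ss with
  | [] => 0
  | s :: rest =>
    let ls := PySem.Str.lower s
    if pvAInner lp ls then i else pvALoop lp rest (i + 1)

def first_index_with_any_py (sentences : List String) (patterns : List String) : Int :=
  pvALoop (patterns.map PySem.Str.lower) sentences 1

-- ===== PORT B =====
-- inner loop of B: first 1-based index in the lowered sentence list containing pl, else 0
def pvBFind (pl : String) (ls : List String) (i : Int) : Int :=
  match ls with
  | [] => 0
  | l :: rest => if PySem.Str.isIn pl l then i else pvBFind pl rest (i + 1)

def first_index_with_any_py_alt (sentences : List String) (patterns : List String) : Int :=
  let lowered := sentences.map PySem.Str.lower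
  patterns.foldl
    (fun best p =>
      let pl := PySem.Str.lower p
      -- only sentences before the current best can still improve the answer
      let limit : Int := if best = 0 then (lowered.length : Int) else best - 1
      let fi := pvBFind pl (PySem.List.slice lowered none (some limit)) 1
      if fi ≠ 0 ∧ (best = 0 ∨ fi < best) then fi else best)
    0

-- ===== PRECONDITION & SPEC =====
def Spec_first_index_with_any_py (sentences : List String) (patterns : List String) (out : Int) : Prop := out = first_index_with_any_py_alt sentences patterns
instance (sentences : List String) (patterns : List String) (out : Int) : Decidable (Spec_first_index_with_any_py sentences patterns out) := by unfold Spec_first_index_with_any_py; infer_instance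

-- ===== CLAIM =====
def Claim_equal_first_index_with_any_py : Prop := ∀ (sentences : List String) (patterns : List String), Dom_first_index_with_any_py sentences patterns → Spec_first_index_with_any_py sentences patterns (first_index_with_any_py sentences patterns)

-- ===== LEMMAS AND PROOFS =====

-- min in the order where 0 means "no match" (ties and 0 keep the left argument) = B's update step
def pvMin0 (a b : Int) : Int := if b ≠ 0 ∧ (a = 0 ∨ b < a) then b else a

theorem pvAInner_cons (p : String) (lp : List String) (ls : String) :
    pvAInner (p :: lp) ls = (PySem.Str.isIn p ls || pvAInner lp ls) := by
  simp [pvAInner]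

theorem pvALoop_nil (ss : List String) (i : Int) : pvALoop [] ss i = 0 := by
  induction ss generalizing i with
  | nil => rfl
  | cons s rest ih => simp [pvALoop, pvAInner, ih]

theorem pvBFind_bound (pl : String) (ls : List String) (i : Int) (hi : 0 < i) :
    pvBFind pl ls i = 0 ∨ i ≤ pvBFind pl ls i := by
  induction ls generalizing i with
  | nil => left; rfl
  | cons l rest ih =>
    simp only [pvBFind]
    split
    · omega
    · rcases ih (i + 1) (by omega) with h | h <;> omega

theorem pvALoop_bound (lp : List String) (ss : List String) (i : Int) (hi : 0 < i) :
    pvALoop lp ss i = 0 ∨ i ≤ pvALoop lp ss i := by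
  induction ss generalizing i with
  | nil => left; rfl
  | cons s rest ih =>
    simp only [pvALoop]
    split
    · omega
    · rcases ih (i + 1) (by omega) with h | h <;> omega

-- splitting off the first pattern: A's first-hit index is the pvMin0 of the rest and this pattern's first index
theorem pvALoop_split (p : String) (lp : List String) (ss : List String) (i : Int) (hi : 0 < i) :
    pvALoop (p :: lp) ss i = pvMin0 (pvALoop lp ss i) (pvBFind p (ss.map PySem.Str.lower) i) := by
  induction ss generalizing i with
  | nil => simp [pvALoop, pvBFind, pvMin0]
  | cons s rest ih =>
    simp only [pvALoop, pvAInner_cons, List.map_cons, pvBFind]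
    by_cases h1 : PySem.Str.isIn p (PySem.Str.lower s) = true
    · simp only [h1, Bool.true_or, if_true]
      by_cases h2 : pvAInner lp (PySem.Str.lower s) = true
      · simp only [h2, if_true, pvMin0]
        split <;> omega
      · simp only [h2, pvMin0, Bool.false_eq_true, ite_false]
        rcases pvALoop_bound lp rest (i + 1) (by omega) with h | h <;>
          (split <;> omega)
    · simp only [h1, Bool.false_or, Bool.false_eq_true, ite_false]
      by_cases h2 : pvAInner lp (PySem.Str.lower s) = true
      · simp only [h2, if_true, pvMin0]
        rcases pvBFind_bound p (rest.map PySem.Str.lower) (i + 1) (by omega) with h | h <;>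
          (split <;> omega)
      · simp only [h2, Bool.false_eq_true, ite_false]
        exact ih (i + 1) (by omega)

theorem pvMin0_comm (a b : Int) (ha : 0 ≤ a) (hb : 0 ≤ b) : pvMin0 a b = pvMin0 b a := by
  unfold pvMin0; split_ifs <;> omega

theorem pvMin0_assoc (a b c : Int) : pvMin0 (pvMin0 a b) c = pvMin0 a (pvMin0 b c) := by
  unfold pvMin0; split_ifs <;> omega

theorem pvMin0_zero_left (b : Int) : pvMin0 0 b = b := by
  unfold pvMin0; split_ifs <;> omega

theorem pvBFind_nonneg (pl : String) (ls : List String) (i : Int) (hi : 0 ≤ i) :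
    0 ≤ pvBFind pl ls i := by
  induction ls generalizing i with
  | nil => simp [pvBFind]
  | cons l rest ih =>
    simp only [pvBFind]
    split
    · exact hi
    · exact ih (i + 1) (by omega)

-- truncating the sentence list at k: B's bounded scan vs the full scan
theorem pvBFind_take (pl : String) (L : List String) (k : Nat) (i : Int) (hi : 0 < i) :
    pvBFind pl (L.take k) i
      = if pvBFind pl L i ≠ 0 ∧ pvBFind pl L i < i + (k : Int) then pvBFind pl L i else 0 := by
  induction L generalizing k i with
  | nil => simp [pvBFind]
  | cons l rest ih =>
    cases k with
    | zero =>
      have hnil : pvBFind pl ([] : List String) i = 0 := rfl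
      simp only [List.take_zero, hnil]
      rcases pvBFind_bound pl (l :: rest) i hi with h | h <;>
        (split_ifs with hc <;> push_cast at hc ⊢ <;> omega)
    | succ k =>
      simp only [List.take_succ_cons, pvBFind]
      by_cases h1 : PySem.Str.isIn pl l = true
      · simp only [h1, if_true]
        split_ifs with hc <;> push_cast at hc <;> omega
      · simp only [h1, Bool.false_eq_true, ite_false]
        rw [ih k (i + 1) (by omega)]
        split_ifs <;> push_cast at * <;> omega

-- B's bounded-scan step computes exactly pvMin0 of the accumulator and the full-scan first index
theorem pvStepTrunc (L : List String) (pl : String) (best : Int) (hb : 0 ≤ best) :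
    (let limit : Int := if best = 0 then (L.length : Int) else best - 1
     let fi := pvBFind pl (PySem.List.slice L none (some limit)) 1
     if fi ≠ 0 ∧ (best = 0 ∨ fi < best) then fi else best)
      = pvMin0 best (pvBFind pl L 1) := by
  by_cases h0 : best = 0
  · subst h0
    simp only [if_true, PySem.List.slice_to_natCast, List.take_length, pvMin0]
  · have hb1 : 0 < best := by omega
    have hk : ((best - 1).toNat : Int) = best - 1 := by omega
    simp only [h0, ite_false]
    rw [show (best - 1) = (((best - 1).toNat : Nat) : Int) from by omega,
        PySem.List.slice_to_natCast, pvBFind_take pl L _ 1 (by omega)]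
    have hf := pvBFind_nonneg pl L 1 (by omega)
    unfold pvMin0
    split_ifs <;> omega

-- the whole fold with the bounded scan equals the fold of pvMin0 over full-scan first indices
theorem pvFold_trunc_eq (L : List String) (ps : List String) (b : Int) (hb : 0 ≤ b) :
    ps.foldl
      (fun best p =>
        let pl := PySem.Str.lower p
        let limit : Int := if best = 0 then (L.length : Int) else best - 1
        let fi := pvBFind pl (PySem.List.slice L none (some limit)) 1
        if fi ≠ 0 ∧ (best = 0 ∨ fi < best) then fi else best) b
      = ps.foldl (fun best p => pvMin0 best (pvBFind (PySem.Str.lower p) L 1)) b := by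
  induction ps generalizing b with
  | nil => rfl
  | cons p rest ih =>
    simp only [List.foldl_cons]
    rw [pvStepTrunc L (PySem.Str.lower p) b hb]
    apply ih
    have := pvBFind_nonneg (PySem.Str.lower p) L 1 (by omega)
    unfold pvMin0; split_ifs <;> omega

-- B's port, with the fold step rewritten as pvMin0 over full-scan first indices
theorem pvAlt_eq (sentences patterns : List String) :
    first_index_with_any_py_alt sentences patterns
      = patterns.foldl
          (fun best p => pvMin0 best (pvBFind (PySem.Str.lower p) (sentences.map PySem.Str.lower) 1)) 0 :=
  pvFold_trunc_eq (sentences.map PySem.Str.lower) patterns 0 (by omega)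

theorem pvFoldl_nonneg (lowered : List String) (ps : List String) (b : Int) (hb : 0 ≤ b) :
    0 ≤ ps.foldl (fun best p => pvMin0 best (pvBFind (PySem.Str.lower p) lowered 1)) b := by
  induction ps generalizing b with
  | nil => simpa
  | cons p rest ih =>
    simp only [List.foldl_cons]
    apply ih
    have := pvBFind_nonneg (PySem.Str.lower p) lowered 1 (by omega)
    unfold pvMin0; split_ifs <;> omega

theorem pvFoldl_shift (lowered : List String) (ps : List String) (b : Int) (hb : 0 ≤ b) :
    ps.foldl (fun best p => pvMin0 best (pvBFind (PySem.Str.lower p) lowered 1)) b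
      = pvMin0 b (ps.foldl (fun best p => pvMin0 best (pvBFind (PySem.Str.lower p) lowered 1)) 0) := by
  induction ps generalizing b with
  | nil => simp [pvMin0]
  | cons p rest ih =>
    simp only [List.foldl_cons]
    have hv : 0 ≤ pvBFind (PySem.Str.lower p) lowered 1 :=
      pvBFind_nonneg _ _ _ (by omega)
    have hmb : 0 ≤ pvMin0 b (pvBFind (PySem.Str.lower p) lowered 1) := by
      unfold pvMin0; split_ifs <;> omega
    rw [ih _ hmb, pvMin0_assoc, pvMin0_zero_left, ← ih _ hv]

-- ===== VERDICT =====
theorem first_index_with_any_py_spec : Claim_equal_first_index_with_any_py := by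
  intro sentences patterns hdom
  clear hdom
  unfold Spec_first_index_with_any_py first_index_with_any_py
  rw [pvAlt_eq]
  induction patterns with
  | nil => simpa using pvALoop_nil sentences 1
  | cons p rest ih =>
    simp only [List.map_cons, List.foldl_cons]
    have hv : 0 ≤ pvBFind (PySem.Str.lower p) (sentences.map PySem.Str.lower) 1 :=
      pvBFind_nonneg (PySem.Str.lower p) (sentences.map PySem.Str.lower) 1 (by omega)
    rw [pvALoop_split (PySem.Str.lower p) (rest.map PySem.Str.lower) sentences 1 (by omega), ih,
        pvMin0_zero_left, pvFoldl_shift _ _ _ hv, pvMin0_comm]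
    · exact pvFoldl_nonneg _ _ 0 (by omega)
    · exact hv
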